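-- pv_equiv track=rewrite | github.com/AstroKhet/KhetCoin | gui/vcmd.py | filename_vcmd
-- ===== SOURCE A (Python) =====
-- import string
--
-- _filename_chars = f"-_.() {string.ascii_letters}{string.digits}"
--
-- def filename_vcmd(new_value: str) -> bool:
--     """
--     Validate input for a filename entry:
--     - Empty string is allowed
--     - Only valid filename characters
--     - Maximum length 40
--     """
--     if new_value == "":
--         return True
--
--     if len(new_value) > 40:
--         return False
--
--     # Check if all characters are valid
--     if all(c in _filename_chars for c in new_value):
--         return True
--
--     return False
-- ===== SOURCE B (Python) =====
-- import re
--
-- _FILENAME_RE = re.compile(r'[-_.() A-Za-z0-9]{0,40}\Z')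
--
-- def filename_vcmd(new_value: str) -> bool:
--     return _FILENAME_RE.fullmatch(new_value) is not None
-- ===== Notes on version B (the rewrite author's own statement) =====
-- stated objective: idiomatic
-- what changed: Replaces the explicit empty/length/all-membership branch chain with a single precompiled anchored regex fullmatch whose character class is the allowed set and whose {0,40} quantifier covers both the empty string and the length cap.
import Mathlib
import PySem

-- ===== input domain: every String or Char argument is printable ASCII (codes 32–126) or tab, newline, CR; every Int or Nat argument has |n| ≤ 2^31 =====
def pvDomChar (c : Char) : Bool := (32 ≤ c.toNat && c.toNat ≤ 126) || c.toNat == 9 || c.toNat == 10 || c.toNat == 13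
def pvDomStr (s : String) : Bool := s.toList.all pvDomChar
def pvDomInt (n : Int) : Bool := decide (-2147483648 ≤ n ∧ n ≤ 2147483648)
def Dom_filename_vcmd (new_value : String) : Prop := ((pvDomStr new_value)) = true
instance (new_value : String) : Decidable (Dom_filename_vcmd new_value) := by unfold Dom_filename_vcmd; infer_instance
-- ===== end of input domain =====

-- B replaces A's empty/length/all-membership branch chain with a single anchored
-- regex fullmatch [-_.() A-Za-z0-9]{0,40} (objective: idiomatic; same return value).

-- ===== PORT A =====
-- _filename_chars = f"-_.() {string.ascii_letters}{string.digits}"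
def pvFilenameChars : String := "-_.() abcdefghijklmnopqrstuvwxyzABCDEFGHIJKLMNOPQRSTUVWXYZ0123456789"

def filename_vcmd (new_value : String) : Bool :=
  if new_value == "" then true
  else if PySem.Str.len new_value > 40 then false
  -- 'c in _filename_chars' for a 1-char c is membership among the string's characters
  else if new_value.toList.all (fun c => pvFilenameChars.toList.contains c) then true
  else false

-- ===== PORT B =====
-- the regex character class [-_.() A-Za-z0-9], tested per character
def pvFilenameClass (c : Char) : Bool :=
  c == '-' || c == '_' || c == '.' || c == '(' || c == ')' || c == ' ' ||
  ('A' ≤ c && c ≤ 'Z') || ('a' ≤ c && c ≤ 'z') || ('0' ≤ c && c ≤ '9')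

-- re.fullmatch(r'[-_.() A-Za-z0-9]{0,40}', s): at most 40 characters, each in the class
def filename_vcmd_alt (new_value : String) : Bool :=
  decide (new_value.toList.length ≤ 40) && new_value.toList.all pvFilenameClass

-- ===== PRECONDITION & SPEC =====
def Spec_filename_vcmd (new_value : String) (out : Bool) : Prop := out = filename_vcmd_alt new_value
instance (new_value : String) (out : Bool) : Decidable (Spec_filename_vcmd new_value out) := by unfold Spec_filename_vcmd; infer_instance

-- ===== CLAIM (what is proved, stated in full; the proofs are below) =====
def Claim_equal_filename_vcmd : Prop := ∀ (new_value : String), Dom_filename_vcmd new_value → Spec_filename_vcmd new_value (filename_vcmd new_value)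

-- ===== LEMMAS AND PROOFS =====

-- A's membership test in _filename_chars coincides with B's regex character class
set_option maxRecDepth 8192 in
theorem pvClass_eq (c : Char) :
    pvFilenameChars.toList.contains c = pvFilenameClass c := by
  have h : pvFilenameChars.toList = ['-', '_', '.', '(', ')', ' ', 'a', 'b', 'c', 'd', 'e',
      'f', 'g', 'h', 'i', 'j', 'k', 'l', 'm', 'n', 'o', 'p', 'q', 'r', 's', 't', 'u', 'v',
      'w', 'x', 'y', 'z', 'A', 'B', 'C', 'D', 'E', 'F', 'G', 'H', 'I', 'J', 'K', 'L', 'M',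
      'N', 'O', 'P', 'Q', 'R', 'S', 'T', 'U', 'V', 'W', 'X', 'Y', 'Z', '0', '1', '2', '3',
      '4', '5', '6', '7', '8', '9'] := by decide
  rw [h, Bool.eq_iff_iff]
  simp only [pvFilenameClass, List.contains_iff_mem, Bool.or_eq_true,
    Bool.and_eq_true, beq_iff_eq, Char.le_def, Char.ext_iff, List.mem_cons,
    List.not_mem_nil, or_false, UInt32.le_iff_toNat_le, UInt32.ext_iff,
    Char.reduceVal, UInt32.reduceToNat, decide_eq_true_eq]
  omega

theorem pvEmpty_iff (s : String) : (s == "") = true ↔ s.toList = [] := by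
  constructor
  · intro h; rw [beq_iff_eq] at h; subst h; rfl
  · intro h
    rw [beq_iff_eq]
    have h2 : String.ofList s.toList = String.ofList [] := congrArg String.ofList h
    simpa using h2

-- ===== VERDICT (by name: the statement is the Claim_ definition above) =====
theorem filename_vcmd_spec : Claim_equal_filename_vcmd := by
  intro s _
  unfold Spec_filename_vcmd filename_vcmd filename_vcmd_alt
  have hall : s.toList.all (fun c => pvFilenameChars.toList.contains c)
      = s.toList.all pvFilenameClass := by
    simp only [pvClass_eq]
  by_cases h0 : (s == "") = true
  · have hl : s.toList = [] := (pvEmpty_iff s).mp h0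
    simp [h0, hl]
  · have hlen : PySem.Str.len s = (s.toList.length : Int) := by
      simp [PySem.Str.len_eq]
    rw [if_neg h0, hlen, hall]
    by_cases h40 : (s.toList.length : Int) > 40
    · rw [if_pos h40]
      have hn : ¬ s.toList.length ≤ 40 := by omega
      rw [decide_eq_false hn, Bool.false_and]
    · rw [if_neg h40]
      have h40' : s.toList.length ≤ 40 := by omega
      simp only [h40', decide_true, Bool.true_and]
      cases s.toList.all pvFilenameClass <;> simp
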